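-- pv_equiv track=rewrite | github.com/ludmilaasb/qumusic-reduction | src/qubo_form_new.py | measures_to_tracks
-- ===== SOURCE A (Python) =====
-- from collections import defaultdict
--
-- def measures_to_tracks(measure_list, M):
--     tracks = defaultdict(dict)
--     for k, v in measure_list.items():
--         for measure in v:
--             for new_track in range(M):
--                 if tracks[new_track].get(measure, -1) == -1:
--                     tracks[new_track][measure] = k
--                     break
--     for k, d in tracks.items():
--         tracks[k] = dict(sorted(d.items()))
--     return tracks
-- ===== SOURCE B (Python) =====
-- def measures_to_tracks(measure_list, M):
--     # Group first: for each measure value, collect the keys that claim it, in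
--     # input order, capped at M (slot i of that list corresponds to track i).
--     slots = {}
--     for k, v in measure_list.items():
--         for m in v:
--             L = slots.setdefault(m, [])
--             if len(L) < M:
--                 L.append(k)
--     T = 0
--     for L in slots.values():
--         T = max(T, len(L))
--     # Regroup by slot index, measures in sorted order.
--     return {i: {m: slots[m][i] for m in sorted(slots) if len(slots[m]) > i}
--             for i in range(T)}
-- ===== Notes on version B (the rewrite author's own statement) =====
-- stated objective: faster
-- what changed: Instead of scanning tracks 0..M-1 for every occurrence of a measure, B keeps one dict mapping each measure value to the (at most M) keys already holding it and builds the track dicts in sorted-key order in a single regrouping pass; Pre_ excludes inputs where an occurrence keyed -1 is followed by a later occurrence of the same measure (with M >= 1), on which A's '-1' free-slot sentinel mistakes the stored key -1 for an empty slot and silently overwrites it, an accident of A's representation.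
-- outside the precondition, e.g. on measures_to_tracks({-1: [5], 2: [5]}, 1): A returns {0: {5: 2}}, B returns {0: {5: -1}}
import Mathlib
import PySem

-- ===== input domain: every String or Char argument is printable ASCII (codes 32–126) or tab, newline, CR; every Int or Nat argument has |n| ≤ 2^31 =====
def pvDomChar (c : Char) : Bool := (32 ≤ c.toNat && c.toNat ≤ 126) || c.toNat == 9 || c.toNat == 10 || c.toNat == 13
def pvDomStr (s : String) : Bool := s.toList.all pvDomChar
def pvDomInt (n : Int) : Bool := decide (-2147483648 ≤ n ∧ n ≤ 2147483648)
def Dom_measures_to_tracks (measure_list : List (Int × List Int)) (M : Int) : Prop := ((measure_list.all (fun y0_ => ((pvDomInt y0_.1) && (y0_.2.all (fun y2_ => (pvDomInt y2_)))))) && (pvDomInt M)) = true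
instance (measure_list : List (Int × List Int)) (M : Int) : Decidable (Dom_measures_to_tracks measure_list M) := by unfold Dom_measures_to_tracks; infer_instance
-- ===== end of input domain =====

-- B replaces A's per-occurrence scan over all M tracks by a single pass that keeps,
-- per measure value, the list of keys already assigned (slot i = track i), then
-- regroups; Pre_ excludes inputs where an occurrence keyed -1 is followed by another
-- occurrence of the same measure, on which A's internal '-1' free-slot sentinel
-- collides with the stored key (see the comment above Pre_).

-- ===== PORT A =====
-- inner 'for new_track in range(M)' loop with break, as a recursion on the loop
-- index new_track (range(M) is consumed lazily in Python); 'tracks[new_track]' on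
-- the defaultdict materialises an empty inner dict (ported as setdefault).
def trackScanFrom (k m M : Int) (tracks : PySem.Dict Int (PySem.Dict Int Int)) (nt : Int) :
    PySem.Dict Int (PySem.Dict Int Int) :=
  if h : nt < M then
    let tracks1 := tracks.setdefault nt PySem.Dict.empty
    let d := tracks1.getD nt PySem.Dict.empty
    if d.getD m (-1) = -1 then tracks1.insert nt (d.insert m k)
    else trackScanFrom k m M tracks1 (nt + 1)
  else tracks
termination_by (M - nt).toNat
decreasing_by omega

def measures_to_tracks (measure_list : List (Int × List Int)) (M : Int) :
    List (Int × List (Int × Int)) :=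
  let tracks := measure_list.foldl (fun tr kv =>
      kv.2.foldl (fun tr measure => trackScanFrom kv.1 measure M tr 0) tr)
    PySem.Dict.empty
  -- final loop 'tracks[k] = dict(sorted(d.items()))': inner keys are distinct, so
  -- sorting the item pairs lexicographically is exactly sorting by the key component.
  tracks.items.map (fun p => (p.1, PySem.List.sorted p.2.items (fun q => q.1) false))

-- ===== PORT B =====
-- one occurrence: L = slots.setdefault(m, []); append the key if fewer than M stored
def slotStep (M k : Int) (slots : PySem.Dict Int (List Int)) (m : Int) :
    PySem.Dict Int (List Int) :=
  let slots1 := slots.setdefault m []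
  let L := slots1.getD m []
  if (L.length : Int) < M then slots1.insert m (L ++ [k]) else slots1

def slotsOf (measure_list : List (Int × List Int)) (M : Int) : PySem.Dict Int (List Int) :=
  measure_list.foldl (fun s kv => kv.2.foldl (fun s m => slotStep M kv.1 s m) s) PySem.Dict.empty

-- T = max(T, len(L)) loop
def maxLenT (slots : PySem.Dict Int (List Int)) : Int :=
  slots.values.foldl (fun t L => max t (L.length : Int)) 0

-- '{m: slots[m][i] for m in sorted(slots) if len(slots[m]) > i}' (index taken only under the guard)
def trackAt (slots : PySem.Dict Int (List Int)) (i : Int) : List (Int × Int) :=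
  (PySem.List.sorted slots.keys (fun x => x) false).filterMap (fun m =>
    let L := slots.getD m []
    if i < (L.length : Int) then (PySem.List.pyGet? L i).map (fun x => (m, x)) else none)

def measures_to_tracks_alt (measure_list : List (Int × List Int)) (M : Int) :
    List (Int × List (Int × Int)) :=
  let slots := slotsOf measure_list M
  (PySem.List.pyRange 0 (maxLenT slots) 1).map (fun i => (i, trackAt slots i))

-- ===== PRECONDITION & SPEC =====
-- the flattened stream of (key, measure) occurrences, in processing order
def occOf (measure_list : List (Int × List Int)) : List (Int × Int) :=
  measure_list.flatMap (fun kv => kv.2.map (fun m => (kv.1, m)))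

-- a sentinel-overwrite opportunity: an occurrence keyed -1 followed (not necessarily
-- adjacently) by another occurrence of the same measure, with at least one track
def Qual (l : List (Int × Int)) (M : Int) : Prop :=
  1 ≤ M ∧ ∃ f ∈ l, List.Sublist [(-1, f.2), f] l

-- Pre_ excludes inputs where some occurrence of a measure is keyed -1 and the same
-- measure occurs again later (with M ≥ 1): there A's 'tracks[t].get(measure, -1) == -1'
-- test mistakes the stored key -1 for its internal 'free slot' sentinel and silently
-- overwrites it -- an accident of A's representation, not a value a natural
-- reimplementation can produce.  A never raises; this is the only exclusion.
def Pre_measures_to_tracks (measure_list : List (Int × List Int)) (M : Int) : Prop :=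
  ¬ Qual (occOf measure_list) M
instance (measure_list : List (Int × List Int)) (M : Int) : Decidable (Pre_measures_to_tracks measure_list M) := by unfold Pre_measures_to_tracks Qual; infer_instance

def pvWitness_measures_to_tracks : (List (Int × List Int)) × Int := ([(0, [5, 7]), (2, [5])], 2)

def Spec_measures_to_tracks (measure_list : List (Int × List Int)) (M : Int) (out : List (Int × List (Int × Int))) : Prop := out = measures_to_tracks_alt measure_list M
instance (measure_list : List (Int × List Int)) (M : Int) (out : List (Int × List (Int × Int))) : Decidable (Spec_measures_to_tracks measure_list M out) := by unfold Spec_measures_to_tracks; infer_instance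

-- ===== CLAIM (what is proved, stated in full; the proofs are below) =====
def Claim_equal_measures_to_tracks : Prop := ∀ (measure_list : List (Int × List Int)) (M : Int), Dom_measures_to_tracks measure_list M → Pre_measures_to_tracks measure_list M → Spec_measures_to_tracks measure_list M (measures_to_tracks measure_list M)

-- ===== LEMMAS AND PROOFS =====

-- A's per-occurrence behaviour, taken literally, is B's slot update plus the
-- sentinel overwrite; the proof goes through this intermediate 'sentinel' update:
def slotStepS (M k : Int) (slots : PySem.Dict Int (List Int)) (m : Int) :
    PySem.Dict Int (List Int) :=
  let slots1 := slots.setdefault m []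
  let L := slots1.getD m []
  if L ≠ [] ∧ L.getLast? = some (-1) then slots1.insert m (L.dropLast ++ [k])
  else if (L.length : Int) < M then slots1.insert m (L ++ [k])
  else slots1

def slotsOfS (measure_list : List (Int × List Int)) (M : Int) : PySem.Dict Int (List Int) :=
  measure_list.foldl (fun s kv => kv.2.foldl (fun s m => slotStepS M kv.1 s m) s) PySem.Dict.empty

-- list-based restatement of A's inner loop, convenient for splitting range(M)
def trackScan (k m : Int) (tracks : PySem.Dict Int (PySem.Dict Int Int)) :
    List Int → PySem.Dict Int (PySem.Dict Int Int)
  | [] => tracks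
  | nt :: rest =>
      let tracks1 := tracks.setdefault nt PySem.Dict.empty
      let d := tracks1.getD nt PySem.Dict.empty
      if d.getD m (-1) = -1 then tracks1.insert nt (d.insert m k)
      else trackScan k m tracks1 rest

theorem trackScanFrom_eq_aux (k m M : Int) :
    ∀ (n : Nat) (nt : Int) (tracks : PySem.Dict Int (PySem.Dict Int Int)),
      (M - nt).toNat = n →
      trackScanFrom k m M tracks nt = trackScan k m tracks (PySem.List.pyRange nt M 1) := by
  intro n
  induction n with
  | zero =>
      intro nt tracks hn
      rw [trackScanFrom, dif_neg (by omega), PySem.List.pyRange_one_eq_nil (by omega)]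
      rfl
  | succ n ih =>
      intro nt tracks hn
      have h : nt < M := by omega
      rw [trackScanFrom, dif_pos h, PySem.List.pyRange_one_cons h]
      simp only [trackScan]
      split
      · rfl
      · exact ih (nt + 1) _ (by omega)

theorem trackScanFrom_eq (k m M : Int) (tracks : PySem.Dict Int (PySem.Dict Int Int)) :
    trackScanFrom k m M tracks 0 = trackScan k m tracks (PySem.List.pyRange 0 M 1) :=
  trackScanFrom_eq_aux k m M (M - 0).toNat 0 tracks rfl

-- what track t sees for measure m, read off B's slots
def lookAt (slots : PySem.Dict Int (List Int)) (t m : Int) : Option Int :=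
  (slots.get? m).bind (fun L => PySem.List.pyGet? L t)

-- slots invariant: distinct keys, lists no longer than max M 0, -1 only in the last position
def GoodS (M : Int) (slots : PySem.Dict Int (List Int)) : Prop :=
  slots.keys.Nodup ∧ ∀ m L, slots.get? m = some L →
    ((L.length : Int) ≤ max M 0 ∧ ∀ (i : Nat) (h : i + 1 < L.length), L[i]'(by omega) ≠ -1)

-- simulation relation between A's tracks and the sentinel slots
def RelT (tracks : PySem.Dict Int (PySem.Dict Int Int)) (slots : PySem.Dict Int (List Int)) : Prop :=
  tracks.keys = PySem.List.pyRange 0 (maxLenT slots) 1 ∧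
  ∀ t d, tracks.get? t = some d → d.keys.Nodup ∧ ∀ m, d.get? m = lookAt slots t m

theorem fmax_le (l : List (List Int)) (a c : Int) (ha : a ≤ c)
    (h : ∀ L ∈ l, (L.length : Int) ≤ c) :
    l.foldl (fun t L => max t (L.length : Int)) a ≤ c := by
  induction l generalizing a with
  | nil => simpa using ha
  | cons x xs ih =>
      simp only [List.foldl_cons]
      exact ih _ (max_le ha (h x (by simp))) (fun L hL => h L (by simp [hL]))

theorem maxLenT_nonneg (slots : PySem.Dict Int (List Int)) : 0 ≤ maxLenT slots :=
  (PySem.List.le_foldl_max_int slots.values (fun L => (L.length : Int)) 0).1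

theorem len_le_maxLenT (slots : PySem.Dict Int (List Int)) {m : Int} {L : List Int}
    (h : slots.get? m = some L) : (L.length : Int) ≤ maxLenT slots := by
  have hmem : L ∈ slots.values := by
    have := PySem.Dict.mem_items_of_get?_eq_some slots h
    simp only [PySem.Dict.values]
    exact List.mem_map.2 ⟨(m, L), this, rfl⟩
  exact (PySem.List.le_foldl_max_int slots.values (fun L => (L.length : Int)) 0).2 L hmem

theorem maxLenT_insert (slots : PySem.Dict Int (List Int)) (m : Int) (newL : List Int)
    (hnd : slots.keys.Nodup)
    (hle : ∀ L0, slots.get? m = some L0 → (L0.length : Int) ≤ (newL.length : Int)) :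
    maxLenT (slots.insert m newL) = max (maxLenT slots) (newL.length : Int) := by
  apply le_antisymm
  · apply fmax_le _ _ _ (le_max_of_le_left (maxLenT_nonneg slots))
    intro L hL
    rcases PySem.Dict.mem_values_insert slots m newL L hL with h1 | h1
    · subst h1; exact le_max_right _ _
    · exact le_max_of_le_left ((PySem.List.le_foldl_max_int slots.values (fun L => (L.length : Int)) 0).2 L h1)
  · apply max_le
    · apply fmax_le _ _ _ (maxLenT_nonneg (slots.insert m newL))
      intro L hL
      obtain ⟨⟨k', L'⟩, hkL, rfl⟩ : ∃ p ∈ slots.items, p.2 = L := by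
        simpa only [PySem.Dict.values, List.mem_map] using hL
      by_cases hk : k' = m
      · subst hk
        have := PySem.Dict.get?_of_mem_items slots hkL hnd
        calc ((L'.length : Int)) ≤ (newL.length : Int) := hle _ this
          _ ≤ _ := by
            have hmem : newL ∈ (slots.insert k' newL).values := by
              simp only [PySem.Dict.values]
              exact List.mem_map.2 ⟨(k', newL), PySem.Dict.mem_items_insert_self _ _ _, rfl⟩
            exact (PySem.List.le_foldl_max_int _ (fun L => (L.length : Int)) 0).2 _ hmem
      · have hmem : L' ∈ (slots.insert m newL).values := by
          simp only [PySem.Dict.values]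
          refine List.mem_map.2 ⟨(k', L'), ?_, rfl⟩
          exact (PySem.Dict.mem_items_insert slots m newL (k', L')).2 (Or.inr ⟨hkL, hk⟩)
        exact (PySem.List.le_foldl_max_int _ (fun L => (L.length : Int)) 0).2 _ hmem
    · have hmem : newL ∈ (slots.insert m newL).values := by
        simp only [PySem.Dict.values]
        exact List.mem_map.2 ⟨(m, newL), PySem.Dict.mem_items_insert_self _ _ _, rfl⟩
      exact (PySem.List.le_foldl_max_int _ (fun L => (L.length : Int)) 0).2 _ hmem

theorem pyGet?_out {xs : List Int} {t : Int} (h : (xs.length : Int) ≤ t) :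
    PySem.List.pyGet? xs t = none := by
  rw [PySem.List.pyGet?_of_nonneg xs (le_trans (Int.natCast_nonneg _) h)]
  apply List.getElem?_eq_none
  omega

theorem pyGet?_pre {xs : List Int} (s : List Int) {t : Int} (h0 : 0 ≤ t)
    (h1 : t < (xs.length : Int)) :
    PySem.List.pyGet? (xs ++ s) t = PySem.List.pyGet? xs t := by
  rw [PySem.List.pyGet?_of_nonneg _ h0, PySem.List.pyGet?_of_nonneg _ h0]
  rw [List.getElem?_append_left (by omega)]

theorem pyGet?_idx {xs : List Int} {t : Int} (h0 : 0 ≤ t) (h : t.toNat < xs.length) :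
    PySem.List.pyGet? xs t = some (xs[t.toNat]) := by
  rw [PySem.List.pyGet?_of_nonneg _ h0, List.getElem?_eq_getElem h]

theorem pyGet?_nil (t : Int) : PySem.List.pyGet? ([] : List Int) t = none := by
  simp [PySem.List.pyGet?_eq_none_iff, PySem.Raise.InRange]

theorem scan_skip (k m : Int) (tracks : PySem.Dict Int (PySem.Dict Int Int)) (nts : List Int)
    (h : ∀ nt ∈ nts, tracks.contains nt = true ∧
        (tracks.getD nt PySem.Dict.empty).getD m (-1) ≠ -1) :
    trackScan k m tracks nts = tracks := by
  induction nts with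
  | nil => rfl
  | cons nt rest ih =>
      have hc := (h nt (by simp)).1
      have hv := (h nt (by simp)).2
      simp only [trackScan, PySem.Dict.setdefault_of_contains tracks _ hc, if_neg hv]
      exact ih (fun x hx => h x (by simp [hx]))

theorem scan_land (k m : Int) (tracks : PySem.Dict Int (PySem.Dict Int Int))
    (nts₁ : List Int) (f : Int) (rest : List Int)
    (h : ∀ nt ∈ nts₁, tracks.contains nt = true ∧
        (tracks.getD nt PySem.Dict.empty).getD m (-1) ≠ -1)
    (hf : (tracks.getD f PySem.Dict.empty).getD m (-1) = -1) :
    trackScan k m tracks (nts₁ ++ f :: rest) =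
      (tracks.setdefault f PySem.Dict.empty).insert f
        ((tracks.getD f PySem.Dict.empty).insert m k) := by
  induction nts₁ with
  | nil =>
      simp only [List.nil_append, trackScan]
      rw [if_pos]
      · congr 1
        rw [PySem.Dict.getD_setdefault_self]
      · rw [PySem.Dict.getD_setdefault_self]; exact hf
  | cons nt rest1 ih =>
      have hc := (h nt (by simp)).1
      have hv := (h nt (by simp)).2
      simp only [List.cons_append, trackScan, PySem.Dict.setdefault_of_contains tracks _ hc,
        if_neg hv]
      exact ih (fun x hx => h x (by simp [hx]))

theorem get?_of_contains {κ ν : Type} [BEq κ] (d : PySem.Dict κ ν) {t : κ}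
    (h : d.contains t = true) (d0 : ν) : d.get? t = some (d.getD t d0) := by
  rw [PySem.Dict.contains_eq_isSome_get?] at h
  cases o : d.get? t with
  | none => rw [o] at h; simp at h
  | some v => rw [PySem.Dict.getD_eq_get?_getD, o]; rfl

theorem skip_at {tracks : PySem.Dict Int (PySem.Dict Int Int)}
    {slots : PySem.Dict Int (List Int)} {m : Int} {L : List Int}
    (hR : RelT tracks slots) (hL : slots.get? m = some L)
    {nt : Int} (h0 : 0 ≤ nt) (h1 : nt < (L.length : Int))
    (hv : L[nt.toNat]'(by omega) ≠ -1) :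
    tracks.contains nt = true ∧
      (tracks.getD nt PySem.Dict.empty).getD m (-1) ≠ -1 := by
  have hT : nt < maxLenT slots := lt_of_lt_of_le h1 (len_le_maxLenT slots hL)
  have hmem : nt ∈ tracks.keys := by
    rw [hR.1]; exact PySem.List.mem_pyRange_one.2 ⟨h0, hT⟩
  have hc : tracks.contains nt = true := (PySem.Dict.contains_iff_mem_keys tracks nt).2 hmem
  refine ⟨hc, ?_⟩
  have hget := get?_of_contains tracks hc PySem.Dict.empty
  have hd := (hR.2 nt _ hget).2 m
  rw [PySem.Dict.getD_eq_get?_getD, hd]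
  unfold lookAt
  rw [hL]
  simp only [Option.bind_some]
  rw [pyGet?_idx h0 (by omega)]
  simpa using hv

-- Rel's per-track clause after a landing step
theorem rel2_land {tracks : PySem.Dict Int (PySem.Dict Int Int)}
    {slots : PySem.Dict Int (List Int)} {m k f : Int} {newL L : List Int}
    (hR1 : tracks.keys = PySem.List.pyRange 0 (maxLenT slots) 1)
    (hR2 : ∀ t d, tracks.get? t = some d → d.keys.Nodup ∧ ∀ m', d.get? m' = lookAt slots t m')
    (hf0 : 0 ≤ f)
    (hlook : ∀ t, lookAt slots t m = PySem.List.pyGet? L t)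
    (hdf : (tracks.getD f PySem.Dict.empty).keys.Nodup ∧
        ∀ m', (tracks.getD f PySem.Dict.empty).get? m' = lookAt slots f m')
    (hpre : ∀ t, 0 ≤ t → t ≠ f → PySem.List.pyGet? newL t = PySem.List.pyGet? L t)
    (hat : PySem.List.pyGet? newL f = some k) :
    ∀ t d, (tracks.insert f ((tracks.getD f PySem.Dict.empty).insert m k)).get? t = some d →
      d.keys.Nodup ∧ ∀ m', d.get? m' = lookAt (slots.insert m newL) t m' := by
  intro t d hd
  rw [PySem.Dict.get?_insert] at hd
  by_cases ht : t = f
  · subst ht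
    rw [if_pos rfl] at hd
    cases hd
    constructor
    · exact PySem.Dict.nodup_keys_insert _ _ _ hdf.1
    · intro m'
      rw [PySem.Dict.get?_insert]
      by_cases hm : m' = m
      · rw [if_pos hm, hm]
        unfold lookAt
        rw [PySem.Dict.get?_insert, if_pos rfl]
        simp only [Option.bind_some]
        exact hat.symm
      · rw [if_neg hm, hdf.2 m']
        unfold lookAt
        rw [PySem.Dict.get?_insert, if_neg hm]
  · rw [if_neg ht] at hd
    have h2 := hR2 t d hd
    refine ⟨h2.1, fun m' => ?_⟩
    by_cases hm : m' = m
    · rw [hm]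
      have h0t : 0 ≤ t := by
        have hmem : t ∈ tracks.keys := by
          by_contra hcon
          rw [(PySem.Dict.get?_eq_none_iff_not_mem_keys tracks t).2 hcon] at hd
          cases hd
        rw [hR1] at hmem
        exact (PySem.List.mem_pyRange_one.1 hmem).1
      rw [h2.2 m, hlook t]
      unfold lookAt
      rw [PySem.Dict.get?_insert, if_pos rfl]
      simp only [Option.bind_some]
      exact (hpre t h0t ht).symm
    · rw [h2.2 m']
      unfold lookAt
      rw [PySem.Dict.get?_insert, if_neg hm]

theorem good_insert {M : Int} {slots : PySem.Dict Int (List Int)} (hG : GoodS M slots)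
    (m : Int) (newL : List Int)
    (hlen : (newL.length : Int) ≤ max M 0)
    (hval : ∀ (i : Nat) (h : i + 1 < newL.length), newL[i]'(by omega) ≠ -1) :
    GoodS M (slots.insert m newL) := by
  refine ⟨PySem.Dict.nodup_keys_insert _ _ _ hG.1, fun m' L' h => ?_⟩
  rw [PySem.Dict.get?_insert] at h
  by_cases hm : m' = m
  · rw [if_pos hm] at h; cases h; exact ⟨hlen, hval⟩
  · rw [if_neg hm] at h; exact hG.2 m' L' h

-- one occurrence (k, m): A's scan over range(M) simulates the sentinel slot update
theorem step_core (M k m : Int) (tracks : PySem.Dict Int (PySem.Dict Int Int))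
    (slots : PySem.Dict Int (List Int)) (L : List Int)
    (hG : GoodS M slots) (hR : RelT tracks slots)
    (hlook : ∀ t, lookAt slots t m = PySem.List.pyGet? L t)
    (hLbound : (L.length : Int) ≤ max M 0)
    (hLval : ∀ (i : Nat) (h : i + 1 < L.length), L[i]'(by omega) ≠ -1)
    (hLT : (L.length : Int) ≤ maxLenT slots)
    (hle : ∀ L0, slots.get? m = some L0 → L0 = L)
    (hgm : L ≠ [] → slots.get? m = some L)
    (hskip : ∀ nt : Int, 0 ≤ nt → nt < (L.length : Int) →
        (∀ (hh : nt.toNat < L.length), L[nt.toNat] ≠ -1) →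
        tracks.contains nt = true ∧ (tracks.getD nt PySem.Dict.empty).getD m (-1) ≠ -1)
    (hs1 : (L ≠ [] ∧ L.getLast? = some (-1)) →
        slotStepS M k slots m = slots.insert m (L.dropLast ++ [k]))
    (hs2 : ¬(L ≠ [] ∧ L.getLast? = some (-1)) → (L.length : Int) < M →
        slotStepS M k slots m = slots.insert m (L ++ [k]))
    (hs3 : ¬(L ≠ [] ∧ L.getLast? = some (-1)) → ¬((L.length : Int) < M) →
        (slotStepS M k slots m = slots ∨
          (slotStepS M k slots m = slots.insert m [] ∧ slots.get? m = none ∧ M ≤ 0 ∧ L = []))) :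
    GoodS M (slotStepS M k slots m) ∧
      RelT (trackScan k m tracks (PySem.List.pyRange 0 M 1)) (slotStepS M k slots m) := by
  have hT0 : 0 ≤ maxLenT slots := maxLenT_nonneg slots
  by_cases hc1 : L ≠ [] ∧ L.getLast? = some (-1)
  · -- CASE A: last slot holds the sentinel -1; it is overwritten in place
    obtain ⟨hne, hlast⟩ := hc1
    have hstep := hs1 ⟨hne, hlast⟩
    have hlen1 : 1 ≤ L.length := List.length_pos_iff.2 hne
    have hlenN : (L.dropLast ++ [k]).length = L.length := by
      simp [List.length_dropLast]; omega
    have hf0 : (0 : Int) ≤ (L.length : Int) - 1 := by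
      have : (1 : Int) ≤ (L.length : Int) := by exact_mod_cast hlen1
      omega
    have hfM : (L.length : Int) - 1 < M := by omega
    have hfT : (L.length : Int) - 1 < maxLenT slots := by omega
    have hgm' := hgm hne
    have hml : maxLenT (slots.insert m (L.dropLast ++ [k])) = maxLenT slots := by
      rw [maxLenT_insert slots m _ hG.1 (fun L0 h => by rw [hle L0 h, hlenN])]
      omega
    have hcf : tracks.contains ((L.length : Int) - 1) = true := by
      refine (PySem.Dict.contains_iff_mem_keys tracks _).2 ?_
      rw [hR.1]; exact PySem.List.mem_pyRange_one.2 ⟨hf0, hfT⟩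
    have hgf := get?_of_contains tracks hcf PySem.Dict.empty
    have hdf := hR.2 _ _ hgf
    have hidx : ((L.length : Int) - 1).toNat = L.length - 1 := by omega
    have hland : (tracks.getD ((L.length : Int) - 1) PySem.Dict.empty).getD m (-1) = -1 := by
      rw [PySem.Dict.getD_eq_get?_getD, hdf.2 m, hlook]
      rw [pyGet?_idx hf0 (by omega)]
      rw [List.getLast?_eq_getElem?, List.getElem?_eq_getElem (by omega)] at hlast
      have := Option.some.inj hlast
      simp only [hidx, this]; rfl
    have hscan : trackScan k m tracks (PySem.List.pyRange 0 M 1) =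
        tracks.insert ((L.length : Int) - 1)
          ((tracks.getD ((L.length : Int) - 1) PySem.Dict.empty).insert m k) := by
      rw [PySem.List.pyRange_one_append 0 ((L.length : Int) - 1) M hf0 (le_of_lt hfM),
        PySem.List.pyRange_one_cons hfM]
      rw [scan_land k m tracks _ _ _ ?_ hland]
      · rw [PySem.Dict.setdefault_of_contains tracks _ hcf]
      · intro nt hnt
        obtain ⟨h0, h1⟩ := PySem.List.mem_pyRange_one.1 hnt
        exact hskip nt h0 (by omega) (fun hh => hLval nt.toNat (by omega))
    have hat : PySem.List.pyGet? (L.dropLast ++ [k]) ((L.length : Int) - 1) = some k := by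
      have heq : (L.length : Int) - 1 = ((L.dropLast.length : Nat) : Int) := by
        simp [List.length_dropLast]; omega
      rw [heq]
      exact PySem.List.pyGet?_append_length _ [] k
    have hpre : ∀ t, 0 ≤ t → t ≠ (L.length : Int) - 1 →
        PySem.List.pyGet? (L.dropLast ++ [k]) t = PySem.List.pyGet? L t := by
      intro t h0 hne'
      by_cases hlt : t < (L.length : Int) - 1
      · rw [pyGet?_pre [k] h0 (by simp [List.length_dropLast]; omega)]
        rw [PySem.List.pyGet?_of_nonneg _ h0, PySem.List.pyGet?_of_nonneg _ h0]
        rw [List.getElem?_dropLast, if_pos (by omega)]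
      · rw [pyGet?_out (by omega : ((L.dropLast ++ [k]).length : Int) ≤ t),
          pyGet?_out (by omega : ((L.length : Int)) ≤ t)]
    constructor
    · rw [hstep]
      refine good_insert hG m _ (by omega) ?_
      intro i h
      have hi : i < L.dropLast.length := by simp [List.length_dropLast]; omega
      rw [List.getElem_append_left hi, List.getElem_dropLast]
      exact hLval i (by simp [List.length_dropLast] at hi; omega)
    · rw [hstep, hscan]
      refine ⟨?_, rel2_land hR.1 hR.2 hf0 hlook hdf hpre hat⟩
      rw [PySem.Dict.keys_insert_of_contains tracks _ hcf, hR.1, hml]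
  · -- no sentinel at the end: every stored key in L is ≠ -1
    have hall : ∀ (i : Nat) (h : i < L.length), L[i] ≠ -1 := by
      intro i h
      by_cases hi : i + 1 < L.length
      · exact hLval i hi
      · have hne : L ≠ [] := by intro hcon; subst hcon; simp at h
        have hi' : i = L.length - 1 := by omega
        intro hcon
        apply hc1
        refine ⟨hne, ?_⟩
        rw [List.getLast?_eq_getElem?, List.getElem?_eq_getElem (by omega)]
        simp only [show L.length - 1 = i from by omega, hcon]
    by_cases hc2 : (L.length : Int) < M
    · -- CASE B: append to the end (track |L|)
      have hstep := hs2 hc1 hc2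
      have hf0 : (0 : Int) ≤ (L.length : Int) := by positivity
      have hml : maxLenT (slots.insert m (L ++ [k])) =
          max (maxLenT slots) ((L.length : Int) + 1) := by
        rw [maxLenT_insert slots m _ hG.1 (fun L0 h => by rw [hle L0 h]; simp)]
        simp
      have hskip' : ∀ nt ∈ PySem.List.pyRange 0 (L.length : Int) 1,
          tracks.contains nt = true ∧
            (tracks.getD nt PySem.Dict.empty).getD m (-1) ≠ -1 := by
        intro nt hnt
        obtain ⟨h0, h1⟩ := PySem.List.mem_pyRange_one.1 hnt
        exact hskip nt h0 h1 (fun hh => hall nt.toNat hh)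
      have hat : PySem.List.pyGet? (L ++ [k]) (L.length : Int) = some k :=
        PySem.List.pyGet?_append_length L [] k
      have hpre : ∀ t, 0 ≤ t → t ≠ (L.length : Int) →
          PySem.List.pyGet? (L ++ [k]) t = PySem.List.pyGet? L t := by
        intro t h0 hne'
        by_cases hlt : t < (L.length : Int)
        · exact pyGet?_pre [k] h0 hlt
        · rw [pyGet?_out (by simp; omega : ((L ++ [k]).length : Int) ≤ t),
            pyGet?_out (by omega : ((L.length : Int)) ≤ t)]
      have hgood : GoodS M (slotStepS M k slots m) := by
        rw [hstep]
        refine good_insert hG m _ (by simp; omega) ?_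
        intro i h
        simp only [List.length_append, List.length_cons, List.length_nil] at h
        rw [List.getElem_append_left (by omega)]
        exact hall i (by omega)
      refine ⟨hgood, ?_⟩
      by_cases hfT : (L.length : Int) < maxLenT slots
      · -- B1: track |L| already exists
        have hcf : tracks.contains (L.length : Int) = true := by
          refine (PySem.Dict.contains_iff_mem_keys tracks _).2 ?_
          rw [hR.1]; exact PySem.List.mem_pyRange_one.2 ⟨hf0, hfT⟩
        have hgf := get?_of_contains tracks hcf PySem.Dict.empty
        have hdf := hR.2 _ _ hgf
        have hland : (tracks.getD (L.length : Int) PySem.Dict.empty).getD m (-1) = -1 := by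
          rw [PySem.Dict.getD_eq_get?_getD, hdf.2 m, hlook]
          rw [pyGet?_out (by omega)]; rfl
        have hscan : trackScan k m tracks (PySem.List.pyRange 0 M 1) =
            tracks.insert (L.length : Int)
              ((tracks.getD (L.length : Int) PySem.Dict.empty).insert m k) := by
          rw [PySem.List.pyRange_one_append 0 (L.length : Int) M hf0 (le_of_lt hc2),
            PySem.List.pyRange_one_cons hc2]
          rw [scan_land k m tracks _ _ _ hskip' hland]
          rw [PySem.Dict.setdefault_of_contains tracks _ hcf]
        rw [hstep, hscan]
        refine ⟨?_, rel2_land hR.1 hR.2 hf0 hlook hdf hpre hat⟩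
        rw [PySem.Dict.keys_insert_of_contains tracks _ hcf, hR.1, hml]
        congr 1
        omega
      · -- B2: a new track is created at the end
        have hfT' : (L.length : Int) = maxLenT slots := by omega
        have hcf : tracks.contains (L.length : Int) = false := by
          rw [← Bool.not_eq_true]
          intro hcon
          have := (PySem.Dict.contains_iff_mem_keys tracks _).1 hcon
          rw [hR.1] at this
          have := (PySem.List.mem_pyRange_one.1 this).2
          omega
        have hgdf : tracks.getD (L.length : Int) PySem.Dict.empty = PySem.Dict.empty :=
          PySem.Dict.getD_of_not_contains tracks _ hcf
        have hdf : (tracks.getD (L.length : Int) PySem.Dict.empty).keys.Nodup ∧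
            ∀ m', (tracks.getD (L.length : Int) PySem.Dict.empty).get? m' =
              lookAt slots (L.length : Int) m' := by
          rw [hgdf]
          refine ⟨by rw [PySem.Dict.keys_empty]; exact List.nodup_nil, fun m' => ?_⟩
          rw [PySem.Dict.get?_empty]
          unfold lookAt
          cases o' : slots.get? m' with
          | none => rfl
          | some L' =>
              simp only [Option.bind_some]
              rw [pyGet?_out (by have := len_le_maxLenT slots o'; omega)]
        have hland : (tracks.getD (L.length : Int) PySem.Dict.empty).getD m (-1) = -1 := by
          rw [hgdf, PySem.Dict.getD_empty]
        have hscan : trackScan k m tracks (PySem.List.pyRange 0 M 1) =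
            tracks.insert (L.length : Int)
              ((tracks.getD (L.length : Int) PySem.Dict.empty).insert m k) := by
          rw [PySem.List.pyRange_one_append 0 (L.length : Int) M hf0 (le_of_lt hc2),
            PySem.List.pyRange_one_cons hc2]
          rw [scan_land k m tracks _ _ _ hskip' hland]
          rw [PySem.Dict.setdefault_of_not_contains tracks _ hcf,
            PySem.Dict.insert_insert_self]
        rw [hstep, hscan]
        refine ⟨?_, rel2_land hR.1 hR.2 hf0 hlook hdf hpre hat⟩
        rw [PySem.Dict.keys_insert_of_not_contains tracks _ hcf, hR.1, hml]
        rw [← hfT']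
        have : max (L.length : Int) ((L.length : Int) + 1) = (L.length : Int) + 1 := by omega
        rw [this, PySem.List.pyRange_one_succ_right hf0]
    · -- CASE C: all M tracks already hold m (or M ≤ 0): nothing changes
      rcases hs3 hc1 hc2 with hstep | ⟨hstep, hnone, hM, hLnil⟩
      · rw [hstep]
        refine ⟨hG, ?_⟩
        rw [scan_skip k m tracks _ ?_]
        · exact hR
        · intro nt hnt
          obtain ⟨h0, h1⟩ := PySem.List.mem_pyRange_one.1 hnt
          exact hskip nt h0 (by omega) (fun hh => hall nt.toNat hh)
      · rw [hstep]
        have hrange : PySem.List.pyRange 0 M 1 = [] := PySem.List.pyRange_one_eq_nil hM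
        rw [hrange]
        show GoodS M (slots.insert m []) ∧ RelT tracks (slots.insert m [])
        have hml : maxLenT (slots.insert m []) = maxLenT slots := by
          rw [maxLenT_insert slots m [] hG.1 (fun L0 h => by rw [hle L0 h, hLnil])]
          simp only [List.length_nil, Nat.cast_zero]
          omega
        constructor
        · exact good_insert hG m [] (by simp) (fun i h => by simp at h)
        · refine ⟨by rw [hR.1, hml], fun t d hd => ?_⟩
          have h2 := hR.2 t d hd
          refine ⟨h2.1, fun m' => ?_⟩
          by_cases hm : m' = m
          · rw [hm, h2.2 m, hlook t]
            unfold lookAt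
            rw [PySem.Dict.get?_insert, if_pos rfl]
            simp only [Option.bind_some]
            rw [hLnil]
          · rw [h2.2 m']
            unfold lookAt
            rw [PySem.Dict.get?_insert, if_neg hm]

theorem step_main (M k m : Int) (tracks : PySem.Dict Int (PySem.Dict Int Int))
    (slots : PySem.Dict Int (List Int)) (hG : GoodS M slots) (hR : RelT tracks slots) :
    GoodS M (slotStepS M k slots m) ∧
      RelT (trackScan k m tracks (PySem.List.pyRange 0 M 1)) (slotStepS M k slots m) := by
  cases o : slots.get? m with
  | some L =>
      have hco : slots.contains m = true := by
        rw [PySem.Dict.contains_eq_isSome_get?, o]; rfl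
      have hgd : slots.getD m [] = L := by
        rw [PySem.Dict.getD_eq_get?_getD, o]; rfl
      have hGL := hG.2 m L o
      refine step_core M k m tracks slots L hG hR ?_ hGL.1 hGL.2 (len_le_maxLenT slots o)
        (fun L0 h => by rw [o] at h; exact (Option.some.inj h.symm)) (fun _ => o) ?_ ?_ ?_ ?_
      · intro t; unfold lookAt; rw [o]; rfl
      · intro nt h0 h1 hv
        exact skip_at hR o h0 h1 (hv (by omega))
      · intro hcond
        simp only [slotStepS, PySem.Dict.setdefault_of_contains slots _ hco, hgd, if_pos hcond]
      · intro hcond hlt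
        simp only [slotStepS, PySem.Dict.setdefault_of_contains slots _ hco, hgd,
          if_neg hcond, if_pos hlt]
      · intro hcond hge
        left
        simp only [slotStepS, PySem.Dict.setdefault_of_contains slots _ hco, hgd,
          if_neg hcond, if_neg hge]
  | none =>
      have hco : slots.contains m = false := by
        rw [PySem.Dict.contains_eq_isSome_get?, o]; rfl
      have hsd : slots.setdefault m [] = slots.insert m [] :=
        PySem.Dict.setdefault_of_not_contains slots _ hco
      refine step_core M k m tracks slots [] hG hR ?_ (by simp) (fun i h => by simp at h)
        (by simpa using maxLenT_nonneg slots) (fun L0 h => by rw [o] at h; cases h)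
        (fun h => absurd rfl h) ?_ ?_ ?_ ?_
      · intro t; unfold lookAt; rw [o]; exact (pyGet?_nil t).symm
      · intro nt h0 h1 hv
        simp only [List.length_nil, Nat.cast_zero] at h1
        omega
      · intro hcond
        exact absurd rfl hcond.1
      · intro hcond hlt
        simp only [List.length_nil, Nat.cast_zero] at hlt
        simp only [slotStepS, hsd, PySem.Dict.getD_insert_self, if_neg hcond]
        rw [if_pos (by simpa using hlt), PySem.Dict.insert_insert_self]
      · intro hcond hge
        simp only [List.length_nil, Nat.cast_zero] at hge
        right
        refine ⟨?_, o, by omega, rfl⟩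
        simp only [slotStepS, hsd, PySem.Dict.getD_insert_self, if_neg hcond]
        rw [if_neg (by simpa using hge)]

theorem fold_inner (M k : Int) (v : List Int)
    (tracks : PySem.Dict Int (PySem.Dict Int Int)) (slots : PySem.Dict Int (List Int))
    (hG : GoodS M slots) (hR : RelT tracks slots) :
    GoodS M (v.foldl (fun s m => slotStepS M k s m) slots) ∧
      RelT (v.foldl (fun tr measure => trackScan k measure tr (PySem.List.pyRange 0 M 1)) tracks)
        (v.foldl (fun s m => slotStepS M k s m) slots) := by
  induction v generalizing tracks slots with
  | nil => exact ⟨hG, hR⟩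
  | cons x xs ih =>
      simp only [List.foldl_cons]
      obtain ⟨hG', hR'⟩ := step_main M k x tracks slots hG hR
      exact ih _ _ hG' hR'

theorem fold_outer (M : Int) (ml : List (Int × List Int))
    (tracks : PySem.Dict Int (PySem.Dict Int Int)) (slots : PySem.Dict Int (List Int))
    (hG : GoodS M slots) (hR : RelT tracks slots) :
    GoodS M (ml.foldl (fun s kv => kv.2.foldl (fun s m => slotStepS M kv.1 s m) s) slots) ∧
      RelT (ml.foldl (fun tr kv =>
          kv.2.foldl (fun tr measure => trackScan kv.1 measure tr (PySem.List.pyRange 0 M 1)) tr)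
        tracks)
        (ml.foldl (fun s kv => kv.2.foldl (fun s m => slotStepS M kv.1 s m) s) slots) := by
  induction ml generalizing tracks slots with
  | nil => exact ⟨hG, hR⟩
  | cons kv rest ih =>
      simp only [List.foldl_cons]
      obtain ⟨hG', hR'⟩ := fold_inner M kv.1 kv.2 tracks slots hG hR
      exact ih _ _ hG' hR'

theorem invariants_hold (ml : List (Int × List Int)) (M : Int) :
    GoodS M (slotsOfS ml M) ∧
      RelT (ml.foldl (fun tr kv =>
          kv.2.foldl (fun tr measure => trackScan kv.1 measure tr (PySem.List.pyRange 0 M 1)) tr)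
        PySem.Dict.empty) (slotsOfS ml M) := by
  have hG0 : GoodS M (PySem.Dict.empty : PySem.Dict Int (List Int)) := by
    refine ⟨by rw [PySem.Dict.keys_empty]; exact List.nodup_nil, fun m L h => ?_⟩
    rw [PySem.Dict.get?_empty] at h; cases h
  have hR0 : RelT (PySem.Dict.empty : PySem.Dict Int (PySem.Dict Int Int)) PySem.Dict.empty := by
    constructor
    · rw [PySem.Dict.keys_empty]
      have : maxLenT (PySem.Dict.empty : PySem.Dict Int (List Int)) = 0 := rfl
      rw [this, PySem.List.pyRange_one_eq_nil le_rfl]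
    · intro t d hd
      rw [PySem.Dict.get?_empty] at hd; cases hd
  exact fold_outer M ml PySem.Dict.empty PySem.Dict.empty hG0 hR0

theorem track_sorted {M : Int} {tracks : PySem.Dict Int (PySem.Dict Int Int)}
    {slots : PySem.Dict Int (List Int)} (hG : GoodS M slots) (hR : RelT tracks slots)
    {t : Int} {d : PySem.Dict Int Int} (hd : tracks.get? t = some d) :
    PySem.List.sorted d.items (fun q => q.1) false = trackAt slots t := by
  obtain ⟨hdnd, hdget⟩ := hR.2 t d hd
  have hmsnd : (PySem.List.sorted slots.keys (fun x => x) false).Nodup :=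
    ((PySem.List.sorted_perm slots.keys (fun x => x) false).nodup_iff).2 hG.1
  have hmsle := PySem.List.sorted_pairwise slots.keys (fun x => x)
  have hmslt : (PySem.List.sorted slots.keys (fun x => x) false).Pairwise (· < ·) :=
    (hmsle.and hmsnd).imp (fun h => lt_of_le_of_ne h.1 h.2)
  have hfst : ∀ m p, ((fun m =>
      let L := slots.getD m []
      if t < (L.length : Int) then (PySem.List.pyGet? L t).map (fun x => (m, x)) else none) m
        = some p) → p.1 = m := by
    intro m p h
    simp only at h
    split at h
    · cases o : PySem.List.pyGet? (slots.getD m []) t with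
      | none => rw [o] at h; cases h
      | some x => rw [o] at h; cases h; rfl
    · cases h
  have hpairs : (trackAt slots t).Pairwise (fun a b => a.1 < b.1) := by
    unfold trackAt
    refine List.pairwise_filterMap.2 (hmslt.imp ?_)
    intro a a' hlt b hb b' hb'
    rw [hfst a b hb, hfst a' b' hb']
    exact hlt
  apply PySem.List.sorted_eq_of_perm_of_pairwise_lt _ _ _ ?_ hpairs
  have hnd1 : (trackAt slots t).Nodup :=
    hpairs.imp (fun h => by intro he; rw [he] at h; exact lt_irrefl _ h)
  have hnd2 : d.items.Nodup := by
    have h := hdnd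
    simp only [PySem.Dict.keys] at h
    exact h.of_map
  rw [List.perm_ext_iff_of_nodup hnd1 hnd2]
  intro p
  have hitems : p ∈ d.items ↔ d.get? p.1 = some p.2 := by
    rw [← (PySem.Dict.get?_eq_some_iff_mem_items d p.1 p.2 hdnd)]
  rw [hitems, hdget p.1]
  unfold trackAt
  rw [List.mem_filterMap]
  constructor
  · rintro ⟨m, hmem, hsome⟩
    have hp1 := hfst m p hsome
    simp only at hsome
    split at hsome
    · rename_i hcond
      cases o : PySem.List.pyGet? (slots.getD m []) t with
      | none => rw [o] at hsome; cases hsome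
      | some x =>
          rw [o] at hsome
          cases hsome
          have hmk : m ∈ slots.keys := (PySem.List.mem_sorted _ _ _ m).1 hmem
          have hgm : ∃ L0, slots.get? m = some L0 := by
            cases og : slots.get? m with
            | none => exact absurd ((PySem.Dict.get?_eq_none_iff_not_mem_keys slots m).1 og) (by simp [hmk])
            | some L0 => exact ⟨L0, rfl⟩
          obtain ⟨L0, hL0⟩ := hgm
          have : slots.getD m [] = L0 := PySem.Dict.getD_of_get?_eq_some slots [] hL0
          unfold lookAt
          rw [hL0]
          simp only [Option.bind_some]
          rw [← this, o]
    · cases hsome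
  · intro hlook'
    unfold lookAt at hlook'
    refine ⟨p.1, ?_, ?_⟩
    · apply (PySem.List.mem_sorted _ _ _ p.1).2
      cases og : slots.get? p.1 with
      | none => rw [og] at hlook'; cases hlook'
      | some L0 =>
          by_contra hcon
          rw [(PySem.Dict.get?_eq_none_iff_not_mem_keys slots p.1).2 hcon] at og
          cases og
    · cases og : slots.get? p.1 with
      | none => rw [og] at hlook'; cases hlook'
      | some L0 =>
          rw [og] at hlook'
          simp only [Option.bind_some] at hlook'
          have hgd : slots.getD p.1 [] = L0 := PySem.Dict.getD_of_get?_eq_some slots [] og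
          simp only [hgd]
          rw [if_pos ?_]
          · rw [hlook']; rfl
          · by_contra hcon
            rw [pyGet?_out (by omega)] at hlook'
            cases hlook'

-- A's result, expressed over the sentinel slots (holds on every input)
theorem A_eq_output (measure_list : List (Int × List Int)) (M : Int) :
    measures_to_tracks measure_list M =
      (PySem.List.pyRange 0 (maxLenT (slotsOfS measure_list M)) 1).map
        (fun i => (i, trackAt (slotsOfS measure_list M) i)) := by
  obtain ⟨hG, hR⟩ := invariants_hold measure_list M
  unfold measures_to_tracks
  simp only [trackScanFrom_eq]
  set slots := slotsOfS measure_list M with hslots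
  set tracks := measure_list.foldl (fun tr kv =>
      kv.2.foldl (fun tr measure => trackScan kv.1 measure tr (PySem.List.pyRange 0 M 1)) tr)
    PySem.Dict.empty with htracks
  show List.map (fun p => (p.1, PySem.List.sorted p.2.items (fun q => q.1) false)) tracks.items
      = List.map (fun i => (i, trackAt slots i)) (PySem.List.pyRange 0 (maxLenT slots) 1)
  have hknd : tracks.keys.Nodup := by
    rw [hR.1]; exact PySem.List.nodup_pyRange_one _ _
  rw [PySem.Dict.items_eq_map_keys tracks hknd PySem.Dict.empty, hR.1, List.map_map]
  apply List.map_congr_left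
  intro t ht
  obtain ⟨h0, hT⟩ := PySem.List.mem_pyRange_one.1 ht
  have hc : tracks.contains t = true := by
    refine (PySem.Dict.contains_iff_mem_keys tracks t).2 ?_
    rw [hR.1]; exact PySem.List.mem_pyRange_one.2 ⟨h0, hT⟩
  have hget := get?_of_contains tracks hc PySem.Dict.empty
  simp only [Function.comp]
  rw [track_sorted hG hR hget]

-- ===== the sentinel slots equal B's slots outside D_ =====

-- keys already holding measure m after the occurrence stream l
def keysOf (l : List (Int × Int)) (m : Int) : List Int :=
  (l.filter (fun e => e.2 == m)).map Prod.fst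

-- characterisation of B's slots after consuming the stream l
def CharS (M : Int) (l : List (Int × Int)) (s : PySem.Dict Int (List Int)) : Prop :=
  s.keys.Nodup ∧
    ∀ m, s.get? m = if keysOf l m = [] then none else some ((keysOf l m).take M.toNat)

theorem keysOf_append (l : List (Int × Int)) (k m m' : Int) :
    keysOf (l ++ [(k, m)]) m' = keysOf l m' ++ (if m = m' then [k] else []) := by
  simp only [keysOf, List.filter_append]
  by_cases h : m = m' <;> simp [h]

theorem char_empty (M : Int) : CharS M [] PySem.Dict.empty := by
  refine ⟨by rw [PySem.Dict.keys_empty]; exact List.nodup_nil, fun m => ?_⟩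
  rw [PySem.Dict.get?_empty]
  simp [keysOf]

theorem char_step (M : Int) (pre : List (Int × Int)) (s : PySem.Dict Int (List Int))
    (k m : Int) (hC : CharS M pre s) : CharS M (pre ++ [(k, m)]) (slotStep M k s m) := by
  obtain ⟨hnd, hget⟩ := hC
  by_cases hk : keysOf pre m = []
  · have h0 : s.get? m = none := by rw [hget m, if_pos hk]
    have hco : s.contains m = false := by rw [PySem.Dict.contains_eq_isSome_get?, h0]; rfl
    have hsd : s.setdefault m [] = s.insert m [] :=
      PySem.Dict.setdefault_of_not_contains s _ hco
    simp only [slotStep, hsd, PySem.Dict.getD_insert_self]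
    by_cases hM : ((([] : List Int).length : Int) < M)
    · rw [if_pos hM, PySem.Dict.insert_insert_self]
      refine ⟨PySem.Dict.nodup_keys_insert _ _ _ hnd, fun m' => ?_⟩
      rw [PySem.Dict.get?_insert, keysOf_append]
      by_cases hm : m' = m
      · subst hm
        have hM1 : 1 ≤ M.toNat := by simp at hM; omega
        have htk : List.take M.toNat [k] = [k] := List.take_of_length_le (by simpa using hM1)
        simp [hk, htk]
      · have hm' : ¬ m = m' := fun he => hm he.symm
        simp only [if_neg hm, if_neg hm', List.append_nil]
        exact hget m'
    · rw [if_neg hM]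
      refine ⟨PySem.Dict.nodup_keys_insert _ _ _ hnd, fun m' => ?_⟩
      rw [PySem.Dict.get?_insert, keysOf_append]
      by_cases hm : m' = m
      · subst hm
        have hM0 : M.toNat = 0 := by simp at hM; omega
        simp [hk, hM0]
      · have hm' : ¬ m = m' := fun he => hm he.symm
        simp only [if_neg hm, if_neg hm', List.append_nil]
        exact hget m'
  · have hL : s.get? m = some ((keysOf pre m).take M.toNat) := by rw [hget m, if_neg hk]
    have hco : s.contains m = true := by rw [PySem.Dict.contains_eq_isSome_get?, hL]; rfl
    have hsd : s.setdefault m [] = s := PySem.Dict.setdefault_of_contains s _ hco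
    have hgd : s.getD m [] = (keysOf pre m).take M.toNat :=
      PySem.Dict.getD_of_get?_eq_some s [] hL
    simp only [slotStep, hsd, hgd]
    by_cases hlt : ((((keysOf pre m).take M.toNat).length : Int) < M)
    · rw [if_pos hlt]
      have hkslen : (keysOf pre m).length < M.toNat := by
        rw [List.length_take] at hlt; omega
      refine ⟨PySem.Dict.nodup_keys_insert _ _ _ hnd, fun m' => ?_⟩
      rw [PySem.Dict.get?_insert, keysOf_append]
      by_cases hm : m' = m
      · subst hm
        have hts : List.take M.toNat (keysOf pre m') = keysOf pre m' :=
          List.take_of_length_le (le_of_lt hkslen)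
        have htk : (keysOf pre m' ++ [k]).take M.toNat = keysOf pre m' ++ [k] := by
          rw [List.take_append, hts, List.take_of_length_le (by simp; omega)]
        simp [hts, htk]
      · have hm' : ¬ m = m' := fun he => hm he.symm
        simp only [if_neg hm, if_neg hm', List.append_nil]
        exact hget m'
    · rw [if_neg hlt]
      refine ⟨hnd, fun m' => ?_⟩
      rw [keysOf_append]
      by_cases hm : m' = m
      · subst hm
        have hge : M.toNat ≤ (keysOf pre m').length := by
          rw [List.length_take] at hlt; omega
        have hne2 : keysOf pre m' ++ [k] ≠ [] := by simp
        rw [hget m', if_neg hk]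
        simp [hne2, List.take_append_of_le_length hge]
      · have hm' : ¬ m = m' := fun he => hm he.symm
        simp only [if_neg hm', List.append_nil]
        exact hget m'

theorem dict_insert_self (d : PySem.Dict Int (List Int)) (k : Int) (v : List Int)
    (hnd : d.keys.Nodup) (h : d.get? k = some v) : d.insert k v = d := by
  have hc : d.contains k = true := by rw [PySem.Dict.contains_eq_isSome_get?, h]; rfl
  apply PySem.Dict.ext
  rw [PySem.Dict.items_insert_of_contains d v hc]
  have he : ∀ p ∈ d.items, (if p.1 == k then (k, v) else p) = id p := by
    intro p hp
    by_cases hpk : p.1 = k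
    · have hg := PySem.Dict.get?_of_mem_items d hp hnd
      rw [hpk, h] at hg
      have hv : v = p.2 := Option.some.inj hg
      have hkv : (k, v) = p := by rw [← hpk, hv]
      simp [hpk, hkv]
    · simp [hpk]
  rw [List.map_congr_left he, List.map_id]

theorem step_eq (M : Int) (pre : List (Int × Int)) (s : PySem.Dict Int (List Int))
    (k m : Int) (rest : List (Int × Int)) (hC : CharS M pre s)
    (hQ : ¬ Qual (pre ++ (k, m) :: rest) M) :
    slotStepS M k s m = slotStep M k s m := by
  obtain ⟨hnd, hget⟩ := hC
  by_cases hk : keysOf pre m = []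
  · have h0 : s.get? m = none := by rw [hget m, if_pos hk]
    have hco : s.contains m = false := by rw [PySem.Dict.contains_eq_isSome_get?, h0]; rfl
    have hsd : s.setdefault m [] = s.insert m [] :=
      PySem.Dict.setdefault_of_not_contains s _ hco
    simp only [slotStepS, slotStep, hsd, PySem.Dict.getD_insert_self]
    rw [if_neg (by simp)]
  · have hL : s.get? m = some ((keysOf pre m).take M.toNat) := by rw [hget m, if_neg hk]
    have hco : s.contains m = true := by rw [PySem.Dict.contains_eq_isSome_get?, hL]; rfl
    have hsd : s.setdefault m [] = s := PySem.Dict.setdefault_of_contains s _ hco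
    have hgd : s.getD m [] = (keysOf pre m).take M.toNat :=
      PySem.Dict.getD_of_get?_eq_some s [] hL
    simp only [slotStepS, slotStep, hsd, hgd]
    set L := (keysOf pre m).take M.toNat with hLdef
    by_cases hg : L ≠ [] ∧ L.getLast? = some (-1)
    · obtain ⟨hne, hlast⟩ := hg
      have hlen1 : 0 < L.length := List.length_pos_iff.2 hne
      have hLle : L.length ≤ M.toNat := by rw [hLdef, List.length_take]; omega
      have hLks : L.length ≤ (keysOf pre m).length := by rw [hLdef, List.length_take]; omega
      by_cases hdiv : ((L.length : Int) < M ∨ k ≠ -1)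
      · -- A really diverges here: exhibit the Qual witness, contradicting hQ
        exfalso
        apply hQ
        have hfl : (pre.filter (fun e => e.2 == m)).length = (keysOf pre m).length := by
          simp [keysOf]
        have hjlt : L.length - 1 < (pre.filter (fun e => e.2 == m)).length := by
          rw [hfl]; omega
        have hsnd : ((pre.filter (fun e => e.2 == m))[L.length - 1]'hjlt).2 = m := by
          have hP := List.of_mem_filter (List.getElem_mem hjlt)
          exact beq_iff_eq.mp hP
        have hfst : ((pre.filter (fun e => e.2 == m))[L.length - 1]'hjlt).1 = -1 := by
          have h1 : (keysOf pre m)[L.length - 1]'(by omega) =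
              ((pre.filter (fun e => e.2 == m))[L.length - 1]'hjlt).1 := by
            simp [keysOf]
          have h2 : L[L.length - 1]'(by omega) = (keysOf pre m)[L.length - 1]'(by omega) :=
            List.getElem_take
          have h3 : L.getLast? = some (L[L.length - 1]'(by omega)) := by
            rw [List.getLast?_eq_getElem?, List.getElem?_eq_getElem (by omega)]
          rw [h3] at hlast
          have := Option.some.inj hlast
          rw [← h1, ← h2, this]
        have hmem : (-1, m) ∈ pre := by
          have : (pre.filter (fun e => e.2 == m))[L.length - 1]'hjlt = (-1, m) :=
            Prod.ext hfst hsnd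
          have hmf := List.getElem_mem hjlt
          rw [this] at hmf
          exact List.mem_of_mem_filter hmf
        refine ⟨by omega, (k, m), by simp, ?_⟩
        exact List.Sublist.append (List.singleton_sublist.mpr hmem)
          (List.singleton_sublist.mpr (List.mem_cons_self))
      · -- the sentinel overwrites -1 with -1 at full capacity: both sides are s
        have hgeM : ¬ ((L.length : Int) < M) := fun h => hdiv (Or.inl h)
        have hkeq : k = -1 := by by_contra h; exact hdiv (Or.inr h)
        rw [if_pos ⟨hne, hlast⟩, if_neg hgeM]
        have hlg : L.getLast hne = -1 := by
          rw [List.getLast?_eq_some_getLast hne] at hlast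
          exact Option.some.inj hlast
        have hdl : L.dropLast ++ [k] = L := by
          rw [hkeq, ← hlg]
          exact List.dropLast_concat_getLast hne
        rw [hdl]
        exact dict_insert_self s m L hnd hL
    · rw [if_neg hg]

theorem fold_eq (M : Int) :
    ∀ (occ pre : List (Int × Int)) (s : PySem.Dict Int (List Int)),
      CharS M pre s → ¬ Qual (pre ++ occ) M →
      occ.foldl (fun s e => slotStepS M e.1 s e.2) s =
        occ.foldl (fun s e => slotStep M e.1 s e.2) s := by
  intro occ
  induction occ with
  | nil => intro pre s _ _; rfl
  | cons e rest ih =>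
      intro pre s hC hQ
      simp only [List.foldl_cons]
      have hQ' : ¬ Qual (pre ++ [e] ++ rest) M := by
        rwa [List.append_cons] at hQ
      obtain ⟨k0, m0⟩ := e
      rw [step_eq M pre s k0 m0 rest hC hQ]
      exact ih (pre ++ [(k0, m0)]) _ (char_step M pre s k0 m0 hC) hQ'

theorem foldl_occOf {σ : Type} (f : Int → σ → Int → σ) :
    ∀ (ml : List (Int × List Int)) (init : σ),
      ml.foldl (fun s kv => kv.2.foldl (fun s m => f kv.1 s m) s) init =
        (occOf ml).foldl (fun s e => f e.1 s e.2) init := by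
  intro ml
  induction ml with
  | nil => intro init; rfl
  | cons kv rest ih =>
      intro init
      simp only [List.foldl_cons, occOf, List.flatMap_cons, List.foldl_append, List.foldl_map]
      rw [ih]
      rfl

theorem slots_eq (ml : List (Int × List Int)) (M : Int)
    (hD : ¬ Qual (occOf ml) M) : slotsOfS ml M = slotsOf ml M := by
  unfold slotsOfS slotsOf
  rw [foldl_occOf (fun k s m => slotStepS M k s m), foldl_occOf (fun k s m => slotStep M k s m)]
  exact fold_eq M (occOf ml) [] PySem.Dict.empty (char_empty M) hD

theorem main_eq (measure_list : List (Int × List Int)) (M : Int)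
    (hD : ¬ Qual (occOf measure_list) M) :
    measures_to_tracks measure_list M = measures_to_tracks_alt measure_list M := by
  rw [A_eq_output, slots_eq measure_list M hD]
  rfl

-- ===== VERDICT (by name: the statement is the Claim_ definition above) =====
theorem measures_to_tracks_spec : Claim_equal_measures_to_tracks := by
  intro measure_list M _ hpre
  unfold Spec_measures_to_tracks
  exact main_eq measure_list M hpre
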